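-- pv_equiv track=rewrite | github.com/coffee-dan/simple-search-engine | search-engine.py | build_postings_lists
-- ===== SOURCE A (Python) =====
-- def build_postings_lists( docs, _filenames, vectors ) :
--
--     terms = []
--     # get list of all terms in corpus by iterating over all documents
--     for doc in docs :
--         for term in doc :
--             terms.append( term )
--
--     postings = []
--     # iterate over all terms to create posting list for each
--     for term in terms :
--         posting = []
--         # iterate over tf_idf_vectors to get values for postings list
--         for vector in vectors :
--             filename = _filenames[ vectors.index( vector ) ]
--             try :
--                 value = vector[ term ]
--             except KeyError :
--                 value = 0
--             posting.append( ( filename, value ) )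
--         posting.sort( key=lambda tup: tup[1], reverse=True )
--         postings.append( ( term, posting ) )
--     return postings
-- ===== SOURCE B (Python) =====
-- def build_postings_lists(docs, _filenames, vectors):
--     names = None          # filenames paired to vectors, built once on first need
--     cache = {}            # term -> its sorted posting list, built once per distinct term
--     out = []
--     for doc in docs:
--         for term in doc:
--             posting = cache.get(term)
--             if posting is None:
--                 if names is None:
--                     names = [_filenames[vectors.index(v)] for v in vectors]
--                 posting = sorted([(nm, v.get(term, 0)) for nm, v in zip(names, vectors)],
--                                  key=lambda t: t[1], reverse=True)
--                 cache[term] = posting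
--             out.append((term, posting))
--     return out
-- ===== Notes on version B (the rewrite author's own statement) =====
-- stated objective: faster
-- what changed: B pairs filenames to vectors once and builds each distinct term's sorted posting once in a cache keyed by term, instead of recomputing the posting (with a linear vectors.index inside the inner loop) for every term occurrence.
import Mathlib
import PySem

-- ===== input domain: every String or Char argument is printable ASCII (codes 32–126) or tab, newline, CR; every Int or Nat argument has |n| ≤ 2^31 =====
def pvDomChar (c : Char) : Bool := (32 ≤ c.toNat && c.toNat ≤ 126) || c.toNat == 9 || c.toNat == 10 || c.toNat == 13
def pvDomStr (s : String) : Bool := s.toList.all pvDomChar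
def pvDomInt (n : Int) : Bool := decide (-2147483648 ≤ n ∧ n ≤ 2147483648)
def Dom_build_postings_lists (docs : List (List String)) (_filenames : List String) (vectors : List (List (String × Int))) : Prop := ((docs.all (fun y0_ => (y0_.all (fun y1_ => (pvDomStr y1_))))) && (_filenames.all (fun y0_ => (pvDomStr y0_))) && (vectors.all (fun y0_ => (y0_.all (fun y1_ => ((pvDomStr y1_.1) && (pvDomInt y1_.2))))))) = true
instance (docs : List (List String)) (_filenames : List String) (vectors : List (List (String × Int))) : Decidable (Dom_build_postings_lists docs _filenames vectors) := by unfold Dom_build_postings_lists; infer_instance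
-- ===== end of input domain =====

-- B builds each distinct term's posting once (caching it) and pairs filenames to vectors once,
-- instead of recomputing the full posting, with a linear vectors.index inside, for every term occurrence.

-- shared Python-builtin helpers: dict lookup (first match) and Python dict equality (order-insensitive)
def pvDGet? (v : List (String × Int)) (k : String) : Option Int :=
  (v.find? (fun p => p.1 == k)).map (·.2)
def pvDictEq (a b : List (String × Int)) : Bool :=
  a.all (fun p => pvDGet? b p.1 == pvDGet? a p.1) && b.all (fun p => pvDGet? a p.1 == pvDGet? b p.1)
-- vectors.index(v): Python compares dicts by ==, which ignores insertion order
def pvVIndex (vectors : List (List (String × Int))) (v : List (String × Int)) : Option Nat :=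
  vectors.findIdx? (fun w => pvDictEq w v)

-- ===== PORT A =====
def build_postings_lists (docs : List (List String)) (_filenames : List String) (vectors : List (List (String × Int))) : List (String × (List (String × Int))) :=
  let terms := docs.foldl (fun ts doc => doc.foldl (fun ts t => ts ++ [t]) ts) []
  terms.foldl (fun postings term =>
    let posting := vectors.foldl (fun posting vector =>
      -- _filenames[vectors.index(vector)]; out of range = IndexError, excluded by Pre_ (default "" unreachable there)
      let filename := (PySem.List.pyGet? _filenames (((pvVIndex vectors vector).getD 0 : Nat) : Int)).getD ""
      -- try vector[term] except KeyError: 0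
      let value := (pvDGet? vector term).getD 0
      posting ++ [(filename, value)]) []
    postings ++ [(term, PySem.List.sorted posting (fun t => t.2) true)]) []

-- ===== PORT B =====
def pvNamesB (_filenames : List String) (vectors : List (List (String × Int))) : List String :=
  vectors.map (fun v => (PySem.List.pyGet? _filenames (((pvVIndex vectors v).getD 0 : Nat) : Int)).getD "")

def pvStepB (_filenames : List String) (vectors : List (List (String × Int)))
    (st : Option (List String) × PySem.Dict String (List (String × Int)) × List (String × List (String × Int)))
    (term : String) :
    Option (List String) × PySem.Dict String (List (String × Int)) × List (String × List (String × Int)) :=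
  match st.2.1.get? term with
  | some posting => (st.1, st.2.1, st.2.2 ++ [(term, posting)])
  | none =>
      let names := match st.1 with
        | some ns => ns
        | none => pvNamesB _filenames vectors
      let posting := PySem.List.sorted
        ((names.zip vectors).map (fun p => (p.1, (pvDGet? p.2 term).getD 0))) (fun t => t.2) true
      (some names, st.2.1.insert term posting, st.2.2 ++ [(term, posting)])

def build_postings_lists_alt (docs : List (List String)) (_filenames : List String) (vectors : List (List (String × Int))) : List (String × (List (String × Int))) :=
  (docs.foldl (fun st doc => doc.foldl (pvStepB _filenames vectors) st)
    ((none : Option (List String)), (PySem.Dict.empty : PySem.Dict String (List (String × Int))), ([] : List (String × List (String × Int))))).2.2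

-- ===== PRECONDITION & SPEC =====
-- Pre_ excludes exactly the inputs where Python A raises IndexError: some document has a term and
-- some vector's (first-equal-dict) index is beyond _filenames.
def Pre_build_postings_lists (docs : List (List String)) (_filenames : List String) (vectors : List (List (String × Int))) : Prop :=
  (∀ doc ∈ docs, doc = []) ∨ (∀ v ∈ vectors, (pvVIndex vectors v).getD 0 < _filenames.length)
instance (docs : List (List String)) (_filenames : List String) (vectors : List (List (String × Int))) : Decidable (Pre_build_postings_lists docs _filenames vectors) := by unfold Pre_build_postings_lists; infer_instance
def pvWitness_build_postings_lists : List (List String) × List String × (List (List (String × Int))) :=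
  ([["a", "b"], ["a"]], ["f.txt", "g.txt"], [[("a", 3)], [("b", 1), ("a", 2)]])

def Spec_build_postings_lists (docs : List (List String)) (_filenames : List String) (vectors : List (List (String × Int))) (out : List (String × (List (String × Int)))) : Prop := out = build_postings_lists_alt docs _filenames vectors
instance (docs : List (List String)) (_filenames : List String) (vectors : List (List (String × Int))) (out : List (String × (List (String × Int)))) : Decidable (Spec_build_postings_lists docs _filenames vectors out) := by unfold Spec_build_postings_lists; infer_instance

-- ===== CLAIM (what is proved, stated in full; the proofs are below) =====
def Claim_equal_build_postings_lists : Prop := ∀ (docs : List (List String)) (_filenames : List String) (vectors : List (List (String × Int))), Dom_build_postings_lists docs _filenames vectors → Pre_build_postings_lists docs _filenames vectors → Spec_build_postings_lists docs _filenames vectors (build_postings_lists docs _filenames vectors)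

-- ===== LEMMAS AND PROOFS =====

-- the canonical posting of one term
def pvP (fns : List String) (vecs : List (List (String × Int))) (term : String) : List (String × Int) :=
  PySem.List.sorted
    (vecs.map (fun vector =>
      ((PySem.List.pyGet? fns (((pvVIndex vecs vector).getD 0 : Nat) : Int)).getD "",
       (pvDGet? vector term).getD 0))) (fun t => t.2) true

theorem pv_foldl_append {α β : Type} (f : α → β) :
    ∀ (l : List α) (acc : List β), l.foldl (fun a x => a ++ [f x]) acc = acc ++ l.map f := by
  intro l
  induction l with
  | nil => simp
  | cons x xs ih => intro acc; simp [List.foldl_cons, ih]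

theorem pv_id_fold : ∀ (d : List String) (acc : List String),
    d.foldl (fun ts t => ts ++ [t]) acc = acc ++ d := by
  intro d
  induction d with
  | nil => simp
  | cons x xs ih => intro acc; simp [List.foldl_cons, ih]

theorem pv_terms_eq : ∀ (ds : List (List String)) (acc : List String),
    ds.foldl (fun ts doc => doc.foldl (fun ts t => ts ++ [t]) ts) acc = acc ++ ds.flatten := by
  intro ds
  induction ds with
  | nil => simp
  | cons d ds ih => intro acc; rw [List.foldl_cons, pv_id_fold, ih]; simp

theorem pv_inner_eq (fns : List String) (vecs : List (List (String × Int))) (term : String) :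
    vecs.foldl (fun posting vector =>
      posting ++ [((PySem.List.pyGet? fns (((pvVIndex vecs vector).getD 0 : Nat) : Int)).getD "",
                   (pvDGet? vector term).getD 0)]) []
    = vecs.map (fun vector =>
      ((PySem.List.pyGet? fns (((pvVIndex vecs vector).getD 0 : Nat) : Int)).getD "",
       (pvDGet? vector term).getD 0)) := by
  rw [pv_foldl_append (fun vector =>
      ((PySem.List.pyGet? fns (((pvVIndex vecs vector).getD 0 : Nat) : Int)).getD "",
       (pvDGet? vector term).getD 0))]
  simp

theorem pv_outer_fold (fns : List String) (vecs : List (List (String × Int))) :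
    ∀ (ts : List String) (acc : List (String × List (String × Int))),
    ts.foldl (fun postings term =>
        postings ++ [(term, PySem.List.sorted (vecs.foldl (fun posting vector =>
          posting ++ [((PySem.List.pyGet? fns (((pvVIndex vecs vector).getD 0 : Nat) : Int)).getD "",
                       (pvDGet? vector term).getD 0)]) []) (fun t => t.2) true)]) acc
    = acc ++ ts.map (fun t => (t, pvP fns vecs t)) := by
  intro ts
  induction ts with
  | nil => simp
  | cons t ts ih =>
      intro acc
      rw [List.foldl_cons, ih, pv_inner_eq]
      simp [pvP]

theorem pvA_eq (docs : List (List String)) (fns : List String) (vecs : List (List (String × Int))) :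
    build_postings_lists docs fns vecs
      = docs.flatten.map (fun t => (t, pvP fns vecs t)) := by
  unfold build_postings_lists
  simp only [pv_terms_eq, List.nil_append]
  rw [pv_outer_fold]
  simp

-- B-side invariant: the names field, once set, is pvNamesB, and every cached posting is canonical
def pvInvB (fns : List String) (vecs : List (List (String × Int)))
    (st : Option (List String) × PySem.Dict String (List (String × Int)) × List (String × List (String × Int))) : Prop :=
  (st.1 = none ∨ st.1 = some (pvNamesB fns vecs)) ∧
  (∀ t p, st.2.1.get? t = some p → p = pvP fns vecs t)

theorem pv_zip_map_self {α β : Type} (f : α → β) :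
    ∀ (l : List α), (l.map f).zip l = l.map (fun x => (f x, x)) := by
  intro l
  induction l with
  | nil => rfl
  | cons x xs ih => simp [ih]

theorem pv_posting_eq (fns : List String) (vecs : List (List (String × Int))) (term : String) :
    PySem.List.sorted (((pvNamesB fns vecs).zip vecs).map
        (fun p => (p.1, (pvDGet? p.2 term).getD 0))) (fun t => t.2) true
      = pvP fns vecs term := by
  unfold pvNamesB pvP
  rw [pv_zip_map_self]
  simp [List.map_map, Function.comp_def]

theorem pv_stepB_inv (fns : List String) (vecs : List (List (String × Int))) :
    ∀ (ts : List String) (st : Option (List String) × PySem.Dict String (List (String × Int)) × List (String × List (String × Int))),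
    pvInvB fns vecs st →
      (ts.foldl (pvStepB fns vecs) st).2.2 = st.2.2 ++ ts.map (fun t => (t, pvP fns vecs t)) ∧
      pvInvB fns vecs (ts.foldl (pvStepB fns vecs) st) := by
  intro ts
  induction ts with
  | nil => intro st h; simpa using h
  | cons t ts ih =>
      intro st h
      obtain ⟨o, c, out⟩ := st
      obtain ⟨ho, hc⟩ := h
      rw [List.foldl_cons]
      cases hg : c.get? t with
      | some p =>
          have hp : p = pvP fns vecs t := hc t p hg
          have hstep : pvStepB fns vecs (o, c, out) t = (o, c, out ++ [(t, p)]) := by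
            simp [pvStepB, hg]
          rw [hstep]
          have := ih (o, c, out ++ [(t, p)]) ⟨ho, hc⟩
          rcases this with ⟨h1, h2⟩
          refine ⟨?_, h2⟩
          rw [h1, hp]
          simp
      | none =>
          have hstep : pvStepB fns vecs (o, c, out) t =
              (some (pvNamesB fns vecs), c.insert t (pvP fns vecs t), out ++ [(t, pvP fns vecs t)]) := by
            rcases ho with h | h
            · replace h : o = none := h
              subst h
              simp [pvStepB, hg, pv_posting_eq]
            · replace h : o = some (pvNamesB fns vecs) := h
              subst h
              simp [pvStepB, hg, pv_posting_eq]
          rw [hstep]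
          have hc' : ∀ t' p, (c.insert t (pvP fns vecs t)).get? t' = some p → p = pvP fns vecs t' := by
            intro t' p hp
            rw [PySem.Dict.get?_insert] at hp
            by_cases ht : t' = t
            · subst ht
              rw [if_pos rfl] at hp
              exact (Option.some.inj hp).symm
            · rw [if_neg ht] at hp
              exact hc t' p hp
          have := ih (some (pvNamesB fns vecs), c.insert t (pvP fns vecs t), out ++ [(t, pvP fns vecs t)]) ⟨Or.inr rfl, hc'⟩
          rcases this with ⟨h1, h2⟩
          refine ⟨?_, h2⟩
          rw [h1]
          simp

theorem pvB_eq (docs : List (List String)) (fns : List String) (vecs : List (List (String × Int))) :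
    build_postings_lists_alt docs fns vecs
      = docs.flatten.map (fun t => (t, pvP fns vecs t)) := by
  unfold build_postings_lists_alt
  have hdocs : ∀ (ds : List (List String)) (st : Option (List String) × PySem.Dict String (List (String × Int)) × List (String × List (String × Int))),
      pvInvB fns vecs st →
        (ds.foldl (fun st doc => doc.foldl (pvStepB fns vecs) st) st).2.2
          = st.2.2 ++ ds.flatten.map (fun t => (t, pvP fns vecs t)) ∧
        pvInvB fns vecs (ds.foldl (fun st doc => doc.foldl (pvStepB fns vecs) st) st) := by
    intro ds
    induction ds with
    | nil => intro st h; simpa using h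
    | cons d ds ih =>
        intro st h
        rw [List.foldl_cons]
        obtain ⟨h1, h2⟩ := pv_stepB_inv fns vecs d st h
        obtain ⟨h3, h4⟩ := ih _ h2
        refine ⟨?_, h4⟩
        rw [h3, h1]
        simp
  have hinv : pvInvB fns vecs ((none : Option (List String)), (PySem.Dict.empty : PySem.Dict String (List (String × Int))), ([] : List (String × List (String × Int)))) := by
    refine ⟨Or.inl rfl, ?_⟩
    intro t p hp
    simp [PySem.Dict.get?_empty] at hp
  simpa using (hdocs docs _ hinv).1

-- ===== VERDICT (by name: the statement is the Claim_ definition above) =====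
theorem build_postings_lists_spec : Claim_equal_build_postings_lists := by
  intro docs fns vecs _ _
  unfold Spec_build_postings_lists
  rw [pvA_eq, pvB_eq]
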